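-- pv_equiv track=rewrite | github.com/Dgeorgealex/PP2023_A5 | Lab3/Ex6.py | unique_and_not_two
-- ===== SOURCE A (Python) =====
-- def unique_and_not_two(my_list):
--     my_unique_set = set()
--     my_not_unique_set = set()
--     for item in my_list:
--         if item in my_not_unique_set:
--             continue
--
--         if item in my_unique_set:
--             my_not_unique_set.add(item)
--             my_unique_set.remove(item)
--         else:
--             my_unique_set.add(item)
--
--     return len(my_unique_set), len(my_not_unique_set)
-- ===== SOURCE B (Python) =====
-- def unique_and_not_two(my_list):
--     counts = {}
--     for item in my_list:
--         counts[item] = counts.get(item, 0) + 1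
--     ones = sum(1 for c in counts.values() if c == 1)
--     multis = sum(1 for c in counts.values() if c > 1)
--     return ones, multis
-- ===== Notes on version B (the rewrite author's own statement) =====
-- stated objective: idiomatic
-- what changed: Replaces the incremental two-set migration (membership tests and element moves between a unique-set and a not-unique-set) with the standard frequency-table idiom: build a count dict in one pass, then classify the counts into ==1 and >1.
import Mathlib
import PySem

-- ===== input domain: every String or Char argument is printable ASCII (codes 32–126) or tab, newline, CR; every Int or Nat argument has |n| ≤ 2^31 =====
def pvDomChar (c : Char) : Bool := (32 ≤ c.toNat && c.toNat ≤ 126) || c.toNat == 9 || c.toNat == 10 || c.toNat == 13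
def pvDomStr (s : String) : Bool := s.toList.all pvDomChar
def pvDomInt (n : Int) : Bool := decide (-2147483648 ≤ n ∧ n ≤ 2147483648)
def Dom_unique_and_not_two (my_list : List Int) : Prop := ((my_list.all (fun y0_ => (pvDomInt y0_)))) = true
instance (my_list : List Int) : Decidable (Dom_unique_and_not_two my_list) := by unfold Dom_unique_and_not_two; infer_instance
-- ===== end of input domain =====

-- B replaces A's incremental two-set migration with one frequency table, then classifies counts (==1 vs >1).

-- ===== PORT A =====
-- loop body of A: skip if already not-unique; else move from unique to not-unique on a repeat; else add to unique.
-- In the middle branch `remove?` is `some` because `s.1.contains item` holds there, so `.getD s.1` is never taken.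
def pyStepA (s : PySem.Set Int × PySem.Set Int) (item : Int) : PySem.Set Int × PySem.Set Int :=
  if PySem.Set.contains s.2 item then s
  else if PySem.Set.contains s.1 item then
    ((PySem.Set.remove? s.1 item).getD s.1, PySem.Set.add s.2 item)
  else (PySem.Set.add s.1 item, s.2)

def unique_and_not_two (my_list : List Int) : Int × Int :=
  let st := my_list.foldl pyStepA (PySem.Set.empty, PySem.Set.empty)
  ((PySem.Set.len st.1 : Int), (PySem.Set.len st.2 : Int))

-- ===== PORT B =====
def unique_and_not_two_alt (my_list : List Int) : Int × Int :=
  let counts : PySem.Dict Int Int :=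
    my_list.foldl (fun d x => d.insert x (d.getD x 0 + 1)) PySem.Dict.empty
  let ones : Int := ((counts.values).countP (fun c => c == 1) : Nat)
  let multis : Int := ((counts.values).countP (fun c => decide (1 < c)) : Nat)
  (ones, multis)

-- ===== PRECONDITION & SPEC =====
def Spec_unique_and_not_two (my_list : List Int) (out : Int × Int) : Prop := out = unique_and_not_two_alt my_list
instance (my_list : List Int) (out : Int × Int) : Decidable (Spec_unique_and_not_two my_list out) := by unfold Spec_unique_and_not_two; infer_instance

-- ===== CLAIM (what is proved, stated in full; the proofs are below) =====
def Claim_equal_unique_and_not_two : Prop := ∀ (my_list : List Int), Dom_unique_and_not_two my_list → Spec_unique_and_not_two my_list (unique_and_not_two my_list)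

-- ===== LEMMAS AND PROOFS =====

-- Invariant of A’s loop: after processing `p`, the unique set holds exactly the elements with
-- count 1 in `p`, the not-unique set exactly those with count ≥ 2, both without duplicates.
theorem pyStepA_inv (l : List Int) : ∀ (p : List Int) (u n : PySem.Set Int),
    u.Nodup → n.Nodup →
    (∀ x, x ∈ u ↔ p.count x = 1) → (∀ x, x ∈ n ↔ 2 ≤ p.count x) →
    (l.foldl pyStepA (u, n)).1.Nodup ∧ (l.foldl pyStepA (u, n)).2.Nodup ∧
    (∀ x, x ∈ (l.foldl pyStepA (u, n)).1 ↔ (p ++ l).count x = 1) ∧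
    (∀ x, x ∈ (l.foldl pyStepA (u, n)).2 ↔ 2 ≤ (p ++ l).count x) := by
  induction l with
  | nil =>
    intro p u n hu hn hmu hmn
    simpa using ⟨hu, hn, hmu, hmn⟩
  | cons x xs ih =>
    intro p u n hu hn hmu hmn
    have hcnt : ∀ y : Int, (p ++ [x]).count y = p.count y + (if y = x then 1 else 0) := by
      intro y
      by_cases h : y = x <;> simp [List.count_append, List.count_eq_zero, h]
    have happ : (p ++ [x]) ++ xs = p ++ (x :: xs) := by simp
    rw [List.foldl_cons, ← happ]
    by_cases h2 : x ∈ n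
    · have h2' := (hmn x).1 h2
      have hs : pyStepA (u, n) x = (u, n) := by simp [pyStepA, h2]
      rw [hs]
      refine ih (p ++ [x]) u n hu hn ?_ ?_
      · intro y
        rw [hmu y, hcnt y]
        by_cases hyx : y = x
        · subst hyx; rw [if_pos rfl]; omega
        · rw [if_neg hyx, Nat.add_zero]
      · intro y
        rw [hmn y, hcnt y]
        by_cases hyx : y = x
        · subst hyx; rw [if_pos rfl]; omega
        · rw [if_neg hyx, Nat.add_zero]
    · by_cases h1 : x ∈ u
      · have hx1 : p.count x = 1 := (hmu x).1 h1
        have hs : pyStepA (u, n) x = (PySem.Set.discard u x, PySem.Set.add n x) := by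
          simp [pyStepA, h1, h2, PySem.Set.remove?_of_mem h1]
        rw [hs]
        refine ih (p ++ [x]) _ _ (PySem.Set.nodup_discard u x hu) (PySem.Set.nodup_add n x hn) ?_ ?_
        · intro y
          rw [PySem.Set.mem_discard, hmu y, hcnt y]
          by_cases hyx : y = x
          · subst hyx
            rw [if_pos rfl]
            constructor
            · rintro ⟨-, hne⟩
              exact absurd rfl hne
            · intro h
              exact absurd h (by omega)
          · rw [if_neg hyx, Nat.add_zero]
            constructor
            · exact fun h => h.1
            · exact fun h => ⟨h, hyx⟩
        · intro y
          rw [PySem.Set.mem_add, hmn y, hcnt y]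
          by_cases hyx : y = x
          · subst hyx
            rw [if_pos rfl]
            constructor
            · intro _
              omega
            · intro _
              exact Or.inr rfl
          · rw [if_neg hyx, Nat.add_zero]
            constructor
            · rintro (h | h)
              · exact h
              · exact absurd h hyx
            · exact Or.inl
      · have hx0 : p.count x = 0 := by
          have a1 : ¬ p.count x = 1 := fun h => h1 ((hmu x).2 h)
          have a2 : ¬ 2 ≤ p.count x := fun h => h2 ((hmn x).2 h)
          omega
        have hs : pyStepA (u, n) x = (PySem.Set.add u x, n) := by
          simp [pyStepA, h1, h2]
        rw [hs]
        refine ih (p ++ [x]) _ _ (PySem.Set.nodup_add u x hu) hn ?_ ?_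
        · intro y
          rw [PySem.Set.mem_add, hmu y, hcnt y]
          by_cases hyx : y = x
          · subst hyx
            rw [if_pos rfl]
            constructor
            · intro _
              omega
            · intro _
              exact Or.inr rfl
          · rw [if_neg hyx, Nat.add_zero]
            constructor
            · rintro (h | h)
              · exact h
              · exact absurd h hyx
            · exact Or.inl
        · intro y
          rw [hmn y, hcnt y]
          by_cases hyx : y = x
          · subst hyx; rw [if_pos rfl]; omega
          · rw [if_neg hyx, Nat.add_zero]

-- B’s result in closed form: counts over the distinct elements of the input.
theorem alt_eq (l : List Int) :
    unique_and_not_two_alt l =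
      ((((PySem.Set.ofList l).countP (fun k => l.count k == 1) : Nat) : Int),
       (((PySem.Set.ofList l).countP (fun k => decide (2 ≤ l.count k)) : Nat) : Int)) := by
  unfold unique_and_not_two_alt
  rw [PySem.Dict.foldl_insert_getD_add_one_eq_counter]
  simp only [PySem.Dict.values, PySem.Dict.items_counter, List.map_map, List.countP_map]
  have e1 : ∀ k : Int, (((fun c : Int => c == 1) ∘ ((fun x => x.2) ∘ fun k => (k, (l.count k : Int)))) k = true)
      ↔ ((fun k => l.count k == 1) k = true) := by
    intro k
    simp [Function.comp]
  have e2 : ∀ k : Int, (((fun c : Int => decide (1 < c)) ∘ ((fun x => x.2) ∘ fun k => (k, (l.count k : Int)))) k = true)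
      ↔ ((fun k => decide (2 ≤ l.count k)) k = true) := by
    intro k
    simp only [Function.comp]
    constructor <;> (intro h; simp at h ⊢; omega)
  rw [List.countP_congr (fun x _ => e1 x), List.countP_congr (fun x _ => e2 x)]

-- ===== VERDICT (by name: the statement is the Claim_ definition above) =====
theorem unique_and_not_two_spec : Claim_equal_unique_and_not_two := by
  intro l _
  unfold Spec_unique_and_not_two
  rw [alt_eq]
  obtain ⟨hu, hn, hmu, hmn⟩ :=
    pyStepA_inv l [] PySem.Set.empty PySem.Set.empty List.nodup_nil List.nodup_nil
      (by simp [PySem.Set.empty]) (by simp [PySem.Set.empty])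
  simp only [List.nil_append] at hmu hmn
  have h1 : (l.foldl pyStepA (PySem.Set.empty, PySem.Set.empty)).1.length
      = (PySem.Set.ofList l).countP (fun k => l.count k == 1) := by
    rw [List.countP_eq_length_filter]
    refine List.Perm.length_eq ?_
    rw [List.perm_ext_iff_of_nodup hu (List.Nodup.filter _ (PySem.Set.nodup_ofList l))]
    intro a
    rw [hmu a]
    simp only [List.mem_filter, PySem.Set.mem_ofList, beq_iff_eq]
    constructor
    · intro h
      exact ⟨List.count_pos_iff.mp (by omega), h⟩
    · intro h
      exact h.2
  have h2 : (l.foldl pyStepA (PySem.Set.empty, PySem.Set.empty)).2.length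
      = (PySem.Set.ofList l).countP (fun k => decide (2 ≤ l.count k)) := by
    rw [List.countP_eq_length_filter]
    refine List.Perm.length_eq ?_
    rw [List.perm_ext_iff_of_nodup hn (List.Nodup.filter _ (PySem.Set.nodup_ofList l))]
    intro a
    rw [hmn a]
    simp only [List.mem_filter, PySem.Set.mem_ofList, decide_eq_true_eq]
    constructor
    · intro h
      exact ⟨List.count_pos_iff.mp (by omega), h⟩
    · intro h
      exact h.2
  simp only [unique_and_not_two, PySem.Set.len, h1, h2]
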